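-- pv_equiv track=rewrite | github.com/rkarkee101/PEO | src/process_optimizer/feature_engineering.py | _factor_to_feature_indices
-- ===== SOURCE A (Python) =====
-- from typing import Any, Dict, List, Optional, Sequence, Tuple
--
-- def _factor_to_feature_indices(feature_names: Sequence[str], factors: Sequence[str]) -> List[int]:
--     """Map original factor names to indices in the preprocessed feature matrix.
--
--     - Numeric factor: exact match
--     - Categorical factor: include all one-hot columns that start with "{factor}_"
--     """
--     idx: List[int] = []
--     fset = [str(f) for f in factors]
--     for i, fn in enumerate(feature_names):
--         for f in fset:
--             if fn == f or fn.startswith(f + "_"):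
--                 idx.append(i)
--                 break
--     # unique, preserve order
--     seen = set()
--     out = []
--     for i in idx:
--         if i not in seen:
--             out.append(i)
--             seen.add(i)
--     return out
-- ===== SOURCE B (Python) =====
-- def _factor_to_feature_indices(feature_names, factors):
--     """Map original factor names to indices in the preprocessed feature matrix.
--
--     Factor-major traversal: collect matching column indices per factor into a
--     set, then recover the increasing order with a final sort.
--     """
--     hits = set()
--     for f in factors:
--         f = str(f)
--         pref = f + "_"
--         for i, fn in enumerate(feature_names):
--             if fn == f or fn.startswith(pref):
--                 hits.add(i)
--     return sorted(hits)
-- ===== Notes on version B (the rewrite author's own statement) =====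
-- stated objective: alternative
-- what changed: B inverts the loop nesting: it scans factor-by-factor, collecting matching column indices into an unordered set, and recovers the increasing order with one final sort, instead of A's feature-by-feature scan with inner break plus an order-preserving seen-set dedup pass.
import Mathlib
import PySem

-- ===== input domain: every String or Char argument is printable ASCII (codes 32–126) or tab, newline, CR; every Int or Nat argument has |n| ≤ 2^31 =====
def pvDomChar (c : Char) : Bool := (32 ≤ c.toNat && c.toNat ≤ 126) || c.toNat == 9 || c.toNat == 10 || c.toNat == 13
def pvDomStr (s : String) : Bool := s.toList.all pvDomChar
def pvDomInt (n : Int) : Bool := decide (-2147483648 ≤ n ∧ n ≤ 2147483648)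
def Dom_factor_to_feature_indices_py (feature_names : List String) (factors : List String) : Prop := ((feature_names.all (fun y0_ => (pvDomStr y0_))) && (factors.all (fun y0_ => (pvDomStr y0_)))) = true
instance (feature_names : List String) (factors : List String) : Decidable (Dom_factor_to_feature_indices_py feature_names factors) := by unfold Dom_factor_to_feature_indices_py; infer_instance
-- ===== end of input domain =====

-- B inverts the loop nesting (factor-major, collecting matches into a set, then one final sort)
-- instead of A's feature-major scan with an order-preserving dedup pass; objective: alternative decomposition.


-- ===== PORT A =====
-- the inner 'for f in fset: if …: idx.append(i); break' appends i exactly when SOME f matches: List.any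
def factor_to_feature_indices_py (feature_names : List String) (factors : List String) : List Int :=
  let fset := factors.map (fun f => f)   -- str(f) on a str is the identity
  let idx : List Int := (PySem.List.enumerate feature_names).foldl
    (fun acc p => if fset.any (fun f => p.2 == f || PySem.Str.startswith p.2 (f ++ "_")) then acc ++ [p.1] else acc) []
  -- unique, preserve order
  (idx.foldl (fun (st : PySem.Set Int × List Int) i =>
      if PySem.Set.contains st.1 i then st else (PySem.Set.add st.1 i, st.2 ++ [i]))
    (PySem.Set.empty, [])).2

-- ===== PORT B =====
def factor_to_feature_indices_py_alt (feature_names : List String) (factors : List String) : List Int :=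
  let hits : PySem.Set Int := factors.foldl
    (fun s f =>
      let pref := f ++ "_"
      (PySem.List.enumerate feature_names).foldl
        (fun s p => if p.2 == f || PySem.Str.startswith p.2 pref then PySem.Set.add s p.1 else s) s)
    PySem.Set.empty
  PySem.List.sorted hits (fun x => x) false

-- ===== PRECONDITION & SPEC =====
def Spec_factor_to_feature_indices_py (feature_names : List String) (factors : List String) (out : List Int) : Prop := out = factor_to_feature_indices_py_alt feature_names factors
instance (feature_names : List String) (factors : List String) (out : List Int) : Decidable (Spec_factor_to_feature_indices_py feature_names factors out) := by unfold Spec_factor_to_feature_indices_py; infer_instance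

-- ===== CLAIM (what is proved, stated in full; the proofs are below) =====
def Claim_equal_factor_to_feature_indices_py : Prop := ∀ (feature_names : List String) (factors : List String), Dom_factor_to_feature_indices_py feature_names factors → Spec_factor_to_feature_indices_py feature_names factors (factor_to_feature_indices_py feature_names factors)

-- ===== LEMMAS AND PROOFS =====

-- the increasing list of matching indices, the common value of both ports
def pvTgt (feature_names : List String) (factors : List String) : List Int :=
  ((PySem.List.enumerate feature_names).filter
      (fun p => factors.any (fun f => p.2 == f || PySem.Str.startswith p.2 (f ++ "_")))).map (fun p => p.1)

theorem pvTgt_pairwise (feature_names factors : List String) :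
    (pvTgt feature_names factors).Pairwise (· < ·) := by
  unfold pvTgt
  rw [List.pairwise_map]
  exact (PySem.List.pairwise_lt_enumerate feature_names 0).filter _

theorem pvTgt_mem (feature_names factors : List String) (x : Int) :
    x ∈ pvTgt feature_names factors ↔
      ∃ p ∈ PySem.List.enumerate feature_names 0, p.1 = x ∧
        ∃ f ∈ factors, (p.2 == f || PySem.Str.startswith p.2 (f ++ "_")) = true := by
  unfold pvTgt
  simp [List.mem_filter, List.any_eq_true]

-- dedup pass: on a Nodup list whose elements are fresh for `seen`, it returns `out ++ l`
theorem pvDedup_nodup (l : List Int) (seen : PySem.Set Int) (out : List Int)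
    (hnd : l.Nodup) (hfresh : ∀ x ∈ l, x ∉ seen) :
    (l.foldl (fun (st : PySem.Set Int × List Int) i =>
        if PySem.Set.contains st.1 i then st else (PySem.Set.add st.1 i, st.2 ++ [i]))
      (seen, out)).2 = out ++ l := by
  induction l generalizing seen out with
  | nil => simp
  | cons a t ih =>
    have ha : PySem.Set.contains seen a = false :=
      Bool.eq_false_iff.mpr (fun hc => hfresh a (List.mem_cons_self ..) ((PySem.Set.contains_iff seen a).mp hc))
    simp only [List.foldl_cons, ha]
    rw [if_neg (by simp)]
    rw [ih (PySem.Set.add seen a) (out ++ [a]) hnd.of_cons]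
    · simp
    · intro x hx
      rw [PySem.Set.mem_add]
      rintro (h | rfl)
      · exact hfresh x (List.mem_cons_of_mem _ hx) h
      · exact (List.nodup_cons.mp hnd).1 hx

-- inner loop of B: membership and nodup
theorem pvInner_mem (l : List (Int × String)) (f : String) (s : PySem.Set Int) (x : Int) :
    x ∈ l.foldl (fun s p => if (p.2 == f || PySem.Str.startswith p.2 (f ++ "_")) then PySem.Set.add s p.1 else s) s ↔
      x ∈ s ∨ ∃ p ∈ l, p.1 = x ∧ (p.2 == f || PySem.Str.startswith p.2 (f ++ "_")) = true := by
  induction l generalizing s with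
  | nil => simp
  | cons a t ih =>
    simp only [List.foldl_cons]
    by_cases h : (a.2 == f || PySem.Str.startswith a.2 (f ++ "_")) = true
    · rw [if_pos h, ih, PySem.Set.mem_add]
      constructor
      · rintro ((hx | hx) | ⟨p, hp, h1, h2⟩)
        · exact Or.inl hx
        · exact Or.inr ⟨a, List.mem_cons_self .., hx.symm, h⟩
        · exact Or.inr ⟨p, List.mem_cons_of_mem _ hp, h1, h2⟩
      · rintro (hx | ⟨p, hp, h1, h2⟩)
        · exact Or.inl (Or.inl hx)
        · rcases List.mem_cons.mp hp with rfl | hp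
          · exact Or.inl (Or.inr h1.symm)
          · exact Or.inr ⟨p, hp, h1, h2⟩
    · rw [if_neg h, ih]
      constructor
      · rintro (hx | ⟨p, hp, h1, h2⟩)
        · exact Or.inl hx
        · exact Or.inr ⟨p, List.mem_cons_of_mem _ hp, h1, h2⟩
      · rintro (hx | ⟨p, hp, h1, h2⟩)
        · exact Or.inl hx
        · rcases List.mem_cons.mp hp with rfl | hp
          · exact absurd h2 h
          · exact Or.inr ⟨p, hp, h1, h2⟩

theorem pvInner_nodup (l : List (Int × String)) (f : String) (s : PySem.Set Int) (hs : s.Nodup) :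
    (l.foldl (fun s p => if (p.2 == f || PySem.Str.startswith p.2 (f ++ "_")) then PySem.Set.add s p.1 else s) s).Nodup := by
  induction l generalizing s with
  | nil => exact hs
  | cons a t ih =>
    simp only [List.foldl_cons]
    split_ifs
    · exact ih _ (PySem.Set.nodup_add _ _ hs)
    · exact ih _ hs

-- outer loop of B: membership and nodup of `hits`
theorem pvHits_mem (factors : List String) (l : List (Int × String)) (s : PySem.Set Int) (x : Int) :
    x ∈ factors.foldl (fun s f => l.foldl
        (fun s p => if (p.2 == f || PySem.Str.startswith p.2 (f ++ "_")) then PySem.Set.add s p.1 else s) s) s ↔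
      x ∈ s ∨ ∃ f ∈ factors, ∃ p ∈ l, p.1 = x ∧ (p.2 == f || PySem.Str.startswith p.2 (f ++ "_")) = true := by
  induction factors generalizing s with
  | nil => simp
  | cons g gs ih =>
    simp only [List.foldl_cons]
    rw [ih, pvInner_mem]
    constructor
    · rintro ((hx | ⟨p, hp, h1, h2⟩) | ⟨f, hf, p, hp, h1, h2⟩)
      · exact Or.inl hx
      · exact Or.inr ⟨g, List.mem_cons_self .., p, hp, h1, h2⟩
      · exact Or.inr ⟨f, List.mem_cons_of_mem _ hf, p, hp, h1, h2⟩
    · rintro (hx | ⟨f, hf, p, hp, h1, h2⟩)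
      · exact Or.inl (Or.inl hx)
      · rcases List.mem_cons.mp hf with rfl | hf
        · exact Or.inl (Or.inr ⟨p, hp, h1, h2⟩)
        · exact Or.inr ⟨f, hf, p, hp, h1, h2⟩

theorem pvHits_nodup (factors : List String) (l : List (Int × String)) (s : PySem.Set Int) (hs : s.Nodup) :
    (factors.foldl (fun s f => l.foldl
        (fun s p => if (p.2 == f || PySem.Str.startswith p.2 (f ++ "_")) then PySem.Set.add s p.1 else s) s) s).Nodup := by
  induction factors generalizing s with
  | nil => exact hs
  | cons g gs ih =>
    exact ih _ (pvInner_nodup _ _ _ hs)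

-- ===== VERDICT (by name: the statement is the Claim_ definition above) =====
theorem factor_to_feature_indices_py_spec : Claim_equal_factor_to_feature_indices_py := by
  intro feature_names factors _
  unfold Spec_factor_to_feature_indices_py factor_to_feature_indices_py factor_to_feature_indices_py_alt
  simp only [List.map_id']
  -- A's idx is pvTgt
  rw [PySem.List.foldl_append_if
        (p := fun p : Int × String => factors.any (fun f => p.2 == f || PySem.Str.startswith p.2 (f ++ "_")))
        (f := fun p : Int × String => p.1)]
  rw [List.nil_append]
  have htgt : ((PySem.List.enumerate feature_names).filter
      (fun p => factors.any (fun f => p.2 == f || PySem.Str.startswith p.2 (f ++ "_")))).map (fun p => p.1)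
      = pvTgt feature_names factors := rfl
  rw [htgt]
  -- A's dedup pass is the identity on the Nodup list pvTgt
  rw [pvDedup_nodup _ _ _ ((pvTgt_pairwise feature_names factors).nodup) (by simp [PySem.Set.empty])]
  rw [List.nil_append]
  -- B's sorted set equals pvTgt
  have hperm : (pvTgt feature_names factors).Perm
      (factors.foldl (fun s f => (PySem.List.enumerate feature_names).foldl
          (fun s p => if (p.2 == f || PySem.Str.startswith p.2 (f ++ "_")) then PySem.Set.add s p.1 else s) s)
        PySem.Set.empty) := by
    rw [List.perm_ext_iff_of_nodup (pvTgt_pairwise feature_names factors).nodup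
          (pvHits_nodup _ _ _ (by simp [PySem.Set.empty]))]
    intro x
    rw [pvTgt_mem, pvHits_mem]
    simp only [PySem.Set.empty, List.not_mem_nil, false_or]
    constructor
    · rintro ⟨p, hp, h1, f, hf, h2⟩
      exact ⟨f, hf, p, hp, h1, h2⟩
    · rintro ⟨f, hf, p, hp, h1, h2⟩
      exact ⟨p, hp, h1, f, hf, h2⟩
  exact (PySem.List.sorted_eq_of_perm_of_pairwise_lt _ _ (fun x => x) hperm
      (by simpa using pvTgt_pairwise feature_names factors)).symm
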